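-- pv_equiv track=rewrite | github.com/deepakachu5114/eyrc23_GG_1110 | Task_6/event_identification.py | map_priority_to_events
-- ===== SOURCE A (Python) =====
-- def map_priority_to_events(priority_edges, events):
--     mapped_dict = {}
--     for key in events.keys():
--         if events[key] == "fire":
--             mapped_dict[key] = (1,priority_edges[key])
--         elif events[key] == "destroyed_buildings":
--             mapped_dict[key] = (2,priority_edges[key])
--         elif events[key] == "human_aid_rehabilitation":
--             mapped_dict[key] = (3,priority_edges[key])
--         elif events[key] == "military_vehicles":
--             mapped_dict[key] = (4,priority_edges[key])
--         elif events[key] == "combat":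
--             mapped_dict[key] = (5,priority_edges[key])
--
--     sorted_dict = dict(sorted(mapped_dict.items(), key=lambda item: item[1][0]))
--
--     present_edge_list = []
--     for key in sorted_dict.keys():
--         present_edge_list.append(sorted_dict[key][1])
--
--     return present_edge_list
-- ===== SOURCE B (Python) =====
-- def map_priority_to_events(priority_edges, events):
--     order = ("fire", "destroyed_buildings", "human_aid_rehabilitation",
--              "military_vehicles", "combat")
--     return [priority_edges[key]
--             for label in order
--             for key, value in events.items() if value == label]
-- ===== Notes on version B (the rewrite author's own statement) =====
-- stated objective: simpler
-- what changed: A tags each kept event with a numeric priority in a dict, stable-sorts the dict items by that number and then walks the sorted dict to collect edges; B drops the numeric tagging, the sort and both intermediate dicts and simply concatenates, for the five labels in fixed priority order, the edges of the events carrying that label.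
-- outside the precondition, e.g. on map_priority_to_events({}, {'k': 'fire'}): A raises KeyError, B raises KeyError
import Mathlib
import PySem

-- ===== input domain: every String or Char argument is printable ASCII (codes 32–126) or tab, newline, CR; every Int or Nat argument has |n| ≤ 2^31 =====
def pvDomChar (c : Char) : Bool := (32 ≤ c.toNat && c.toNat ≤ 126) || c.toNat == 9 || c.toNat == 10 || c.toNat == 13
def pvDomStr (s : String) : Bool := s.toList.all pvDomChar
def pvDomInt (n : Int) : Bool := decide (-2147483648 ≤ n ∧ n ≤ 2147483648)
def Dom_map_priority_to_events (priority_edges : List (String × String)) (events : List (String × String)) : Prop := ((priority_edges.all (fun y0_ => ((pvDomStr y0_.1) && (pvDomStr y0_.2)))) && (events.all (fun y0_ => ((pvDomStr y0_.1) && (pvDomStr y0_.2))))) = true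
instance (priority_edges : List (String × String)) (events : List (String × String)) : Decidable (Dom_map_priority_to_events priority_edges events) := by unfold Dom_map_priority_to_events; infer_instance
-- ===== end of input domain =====

-- B replaces A's build-numbered-dict / stable-sort / extract pipeline by one filtering pass per
-- priority label concatenated in fixed priority order (no sort, no intermediate dict); objective: simpler.
-- Both ports model priority_edges[key] with getD (exact on Pre_, which excludes the KeyError inputs).

-- ===== PORT A =====
def map_priority_to_events (priority_edges : List (String × String)) (events : List (String × String)) : List String :=
  let ped := PySem.Dict.ofList priority_edges
  let evd := PySem.Dict.ofList events
  let mapped := evd.keys.foldl (fun (d : PySem.Dict String (Int × String)) key =>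
    let v := evd.getD key ""
    if v == "fire" then d.insert key (1, ped.getD key "")
    else if v == "destroyed_buildings" then d.insert key (2, ped.getD key "")
    else if v == "human_aid_rehabilitation" then d.insert key (3, ped.getD key "")
    else if v == "military_vehicles" then d.insert key (4, ped.getD key "")
    else if v == "combat" then d.insert key (5, ped.getD key "")
    else d) PySem.Dict.empty
  let sortedDict := PySem.Dict.ofList (PySem.List.sorted mapped.items (fun item => item.2.1))
  sortedDict.keys.foldl (fun acc key => acc ++ [(sortedDict.getD key (0, "")).2]) []

-- ===== PORT B =====
def map_priority_to_events_alt (priority_edges : List (String × String)) (events : List (String × String)) : List String :=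
  let ped := PySem.Dict.ofList priority_edges
  let evd := PySem.Dict.ofList events
  ["fire", "destroyed_buildings", "human_aid_rehabilitation", "military_vehicles", "combat"].foldl
    (fun acc label =>
      acc ++ (evd.items.filter (fun p => p.2 == label)).map (fun p => ped.getD p.1 "")) []

-- ===== PRECONDITION & SPEC =====
-- Pre_ excludes exactly the inputs where Python A raises KeyError: an event key whose (dict) label is
-- one of the five priority labels but which is missing from priority_edges.
def Pre_map_priority_to_events (priority_edges : List (String × String)) (events : List (String × String)) : Prop :=
  ∀ p ∈ events,
    ((PySem.Dict.ofList events).getD p.1 "") ∈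
      (["fire", "destroyed_buildings", "human_aid_rehabilitation", "military_vehicles", "combat"] : List String) →
    (PySem.Dict.ofList priority_edges).contains p.1 = true
instance (priority_edges : List (String × String)) (events : List (String × String)) : Decidable (Pre_map_priority_to_events priority_edges events) := by unfold Pre_map_priority_to_events; infer_instance
def pvWitness_map_priority_to_events : (List (String × String)) × (List (String × String)) :=
  ([("k", "e1")], [("k", "fire")])
def Spec_map_priority_to_events (priority_edges : List (String × String)) (events : List (String × String)) (out : List String) : Prop := out = map_priority_to_events_alt priority_edges events
instance (priority_edges : List (String × String)) (events : List (String × String)) (out : List String) : Decidable (Spec_map_priority_to_events priority_edges events out) := by unfold Spec_map_priority_to_events; infer_instance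

-- ===== CLAIM (what is proved, stated in full; the proofs are below) =====
def Claim_equal_map_priority_to_events : Prop := ∀ (priority_edges : List (String × String)) (events : List (String × String)), Dom_map_priority_to_events priority_edges events → Pre_map_priority_to_events priority_edges events → Spec_map_priority_to_events priority_edges events (map_priority_to_events priority_edges events)

-- ===== LEMMAS AND PROOFS =====

-- the if-chain of A, as a partial priority map (proof-only helper)
def pvG (ped : PySem.Dict String String) (p : String × String) : Option (String × (Int × String)) :=
  if p.2 == "fire" then some (p.1, (1, ped.getD p.1 ""))
  else if p.2 == "destroyed_buildings" then some (p.1, (2, ped.getD p.1 ""))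
  else if p.2 == "human_aid_rehabilitation" then some (p.1, (3, ped.getD p.1 ""))
  else if p.2 == "military_vehicles" then some (p.1, (4, ped.getD p.1 ""))
  else if p.2 == "combat" then some (p.1, (5, ped.getD p.1 ""))
  else none

theorem pv_foldl_append_singleton {α β : Type} (f : α → β) :
    ∀ (l : List α) (acc : List β), l.foldl (fun acc x => acc ++ [f x]) acc = acc ++ l.map f := by
  intro l
  induction l with
  | nil => simp
  | cons x t ih => intro acc; simp [List.foldl, ih]

theorem pv_fst_filterMap (ped : PySem.Dict String String) :
    ∀ l : List (String × String),
      (l.filterMap (pvG ped)).map Prod.fst = (l.filter (fun p => (pvG ped p).isSome)).map Prod.fst := by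
  intro l
  induction l with
  | nil => simp
  | cons p t ih =>
    simp only [List.filterMap_cons, List.filter_cons]
    rcases hG : pvG ped p with _ | q
    · simp [hG, ih]
    · have hshape : q.1 = p.1 := by
        simp only [pvG] at hG; split_ifs at hG <;> simp_all [Prod.ext_iff]
      simp [hG, ih, hshape]

theorem pv_bounds (ped : PySem.Dict String String) (l : List (String × String)) :
    ∀ q ∈ l.filterMap (pvG ped), 1 ≤ q.2.1 ∧ q.2.1 ≤ 5 := by
  intro q hq
  obtain ⟨p, _, hG⟩ := List.mem_filterMap.mp hq
  simp only [pvG] at hG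
  split_ifs at hG <;>
    first
      | (cases Option.some.inj hG; exact ⟨by norm_num, by norm_num⟩)
      | simp at hG

theorem pv_insertBy_nil {α : Type} (before : α → α → Bool) (x : α) :
    PySem.List.insertBy before x [] = [x] := rfl

theorem pv_insertBy_cons {α : Type} (before : α → α → Bool) (x y : α) (ys : List α) :
    PySem.List.insertBy before x (y :: ys) =
      if before x y then x :: y :: ys else y :: PySem.List.insertBy before x ys := rfl

theorem pv_insertBy_split {α : Type} (before : α → α → Bool) (x : α) :
    ∀ (L R : List α), (∀ y ∈ L, before x y = false) → (∀ y ∈ R, before x y = true) →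
      PySem.List.insertBy before x (L ++ R) = L ++ x :: R := by
  intro L
  induction L with
  | nil =>
    intro R _ hR
    cases R with
    | nil => simp [pv_insertBy_nil]
    | cons y ys => simp [pv_insertBy_cons, hR y (by simp)]
  | cons y L ih =>
    intro R hL hR
    have hy : before x y = false := hL y (by simp)
    simp [pv_insertBy_cons, hy, ih R (fun z hz => hL z (by simp [hz])) hR]

theorem pv_sorted_five {α : Type} (key : α → Int) :
    ∀ (xs : List α), (∀ x ∈ xs, 1 ≤ key x ∧ key x ≤ 5) →
      PySem.List.sorted xs key =
        (xs.filter (fun x => key x == 1)) ++ (xs.filter (fun x => key x == 2)) ++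
        (xs.filter (fun x => key x == 3)) ++ (xs.filter (fun x => key x == 4)) ++
        (xs.filter (fun x => key x == 5)) := by
  intro xs
  induction xs using List.reverseRecOn with
  | nil => intro _; simp [PySem.List.sorted]
  | append_singleton t x ih =>
    intro hb
    have hbt : ∀ y ∈ t, 1 ≤ key y ∧ key y ≤ 5 := fun y hy => hb y (by simp [hy])
    have hbx : 1 ≤ key x ∧ key x ≤ 5 := hb x (by simp)
    rw [PySem.List.sorted_eq_foldl_insertBy, List.foldl_append, ← PySem.List.sorted_eq_foldl_insertBy,
      ih hbt]
    simp only [List.foldl_cons, List.foldl_nil, List.filter_append]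
    have hkx : key x = 1 ∨ key x = 2 ∨ key x = 3 ∨ key x = 4 ∨ key x = 5 := by omega
    set before := fun a b => decide (key a < key b) with hbef
    rcases hkx with h | h | h | h | h
    · rw [show (((((t.filter (fun z => key z == 1)) ++ (t.filter (fun z => key z == 2))) ++ (t.filter (fun z => key z == 3))) ++ (t.filter (fun z => key z == 4))) ++ (t.filter (fun z => key z == 5))) = (t.filter (fun z => key z == 1)) ++ ((((t.filter (fun z => key z == 2)) ++ (t.filter (fun z => key z == 3))) ++ (t.filter (fun z => key z == 4))) ++ (t.filter (fun z => key z == 5))) by simp,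
        pv_insertBy_split before x _ _
          (by intro y hy; simp only [List.mem_append, List.mem_filter, beq_iff_eq] at hy; simp only [hbef, decide_eq_false_iff_not, not_lt, decide_eq_true_eq]; omega)
          (by intro y hy; simp only [List.mem_append, List.mem_filter, beq_iff_eq] at hy; simp only [hbef, decide_eq_false_iff_not, not_lt, decide_eq_true_eq]; omega)]
      simp [h]
    · rw [show (((((t.filter (fun z => key z == 1)) ++ (t.filter (fun z => key z == 2))) ++ (t.filter (fun z => key z == 3))) ++ (t.filter (fun z => key z == 4))) ++ (t.filter (fun z => key z == 5))) = ((t.filter (fun z => key z == 1)) ++ (t.filter (fun z => key z == 2))) ++ (((t.filter (fun z => key z == 3)) ++ (t.filter (fun z => key z == 4))) ++ (t.filter (fun z => key z == 5))) by simp,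
        pv_insertBy_split before x _ _
          (by intro y hy; simp only [List.mem_append, List.mem_filter, beq_iff_eq] at hy; simp only [hbef, decide_eq_false_iff_not, not_lt, decide_eq_true_eq]; omega)
          (by intro y hy; simp only [List.mem_append, List.mem_filter, beq_iff_eq] at hy; simp only [hbef, decide_eq_false_iff_not, not_lt, decide_eq_true_eq]; omega)]
      simp [h]
    · rw [show (((((t.filter (fun z => key z == 1)) ++ (t.filter (fun z => key z == 2))) ++ (t.filter (fun z => key z == 3))) ++ (t.filter (fun z => key z == 4))) ++ (t.filter (fun z => key z == 5))) = (((t.filter (fun z => key z == 1)) ++ (t.filter (fun z => key z == 2))) ++ (t.filter (fun z => key z == 3))) ++ ((t.filter (fun z => key z == 4)) ++ (t.filter (fun z => key z == 5))) by simp,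
        pv_insertBy_split before x _ _
          (by intro y hy; simp only [List.mem_append, List.mem_filter, beq_iff_eq] at hy; simp only [hbef, decide_eq_false_iff_not, not_lt, decide_eq_true_eq]; omega)
          (by intro y hy; simp only [List.mem_append, List.mem_filter, beq_iff_eq] at hy; simp only [hbef, decide_eq_false_iff_not, not_lt, decide_eq_true_eq]; omega)]
      simp [h]
    · rw [show (((((t.filter (fun z => key z == 1)) ++ (t.filter (fun z => key z == 2))) ++ (t.filter (fun z => key z == 3))) ++ (t.filter (fun z => key z == 4))) ++ (t.filter (fun z => key z == 5))) = ((((t.filter (fun z => key z == 1)) ++ (t.filter (fun z => key z == 2))) ++ (t.filter (fun z => key z == 3))) ++ (t.filter (fun z => key z == 4))) ++ (t.filter (fun z => key z == 5)) by simp,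
        pv_insertBy_split before x _ _
          (by intro y hy; simp only [List.mem_append, List.mem_filter, beq_iff_eq] at hy; simp only [hbef, decide_eq_false_iff_not, not_lt, decide_eq_true_eq]; omega)
          (by intro y hy; simp only [List.mem_append, List.mem_filter, beq_iff_eq] at hy; simp only [hbef, decide_eq_false_iff_not, not_lt, decide_eq_true_eq]; omega)]
      simp [h]
    · rw [show (((((t.filter (fun z => key z == 1)) ++ (t.filter (fun z => key z == 2))) ++ (t.filter (fun z => key z == 3))) ++ (t.filter (fun z => key z == 4))) ++ (t.filter (fun z => key z == 5))) = (((((t.filter (fun z => key z == 1)) ++ (t.filter (fun z => key z == 2))) ++ (t.filter (fun z => key z == 3))) ++ (t.filter (fun z => key z == 4))) ++ (t.filter (fun z => key z == 5))) ++ ([] : List α) by simp,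
        pv_insertBy_split before x _ _
          (by intro y hy; simp only [List.mem_append, List.mem_filter, beq_iff_eq] at hy; simp only [hbef, decide_eq_false_iff_not, not_lt, decide_eq_true_eq]; omega)
          (by intro y hy; simp at hy)]
      simp [h]

theorem pv_mapped_items (ped : PySem.Dict String String) :
    ∀ (l : List (String × String)) (d : PySem.Dict String (Int × String)),
      (l.map Prod.fst).Nodup → (∀ p ∈ l, d.contains p.1 = false) →
      (l.foldl (fun d p =>
        if p.2 == "fire" then d.insert p.1 (1, ped.getD p.1 "")
        else if p.2 == "destroyed_buildings" then d.insert p.1 (2, ped.getD p.1 "")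
        else if p.2 == "human_aid_rehabilitation" then d.insert p.1 (3, ped.getD p.1 "")
        else if p.2 == "military_vehicles" then d.insert p.1 (4, ped.getD p.1 "")
        else if p.2 == "combat" then d.insert p.1 (5, ped.getD p.1 "")
        else d) d).items = d.items ++ l.filterMap (pvG ped) := by
  intro l
  induction l with
  | nil => intro d _ _; simp
  | cons p t ih =>
    intro d hnd hfresh
    have hnd2 : (p.1 :: t.map Prod.fst).Nodup := by simpa using hnd
    have hnd' : (t.map Prod.fst).Nodup := hnd2.of_cons
    have hp1 : p.1 ∉ t.map Prod.fst := (List.nodup_cons.mp hnd2).1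
    have hfresh' : ∀ (v : Int × String), ∀ q ∈ t, (d.insert p.1 v).contains q.1 = false := by
      intro v q hq
      rw [PySem.Dict.contains_insert]
      have h1 : (q.1 == p.1) = false := by
        simp only [beq_eq_false_iff_ne]
        intro h; exact hp1 (by simpa [← h] using List.mem_map_of_mem (f := Prod.fst) hq)
      simp [h1, hfresh q (by simp [hq])]
    have hins : ∀ (v : Int × String), (d.insert p.1 v).items = d.items ++ [(p.1, v)] :=
      fun v => PySem.Dict.items_insert_of_not_contains _ v (hfresh p (by simp))
    have step : ∀ v : Int × String,
        (List.foldl (fun d p =>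
          if p.2 == "fire" then d.insert p.1 (1, ped.getD p.1 "")
          else if p.2 == "destroyed_buildings" then d.insert p.1 (2, ped.getD p.1 "")
          else if p.2 == "human_aid_rehabilitation" then d.insert p.1 (3, ped.getD p.1 "")
          else if p.2 == "military_vehicles" then d.insert p.1 (4, ped.getD p.1 "")
          else if p.2 == "combat" then d.insert p.1 (5, ped.getD p.1 "")
          else d) (d.insert p.1 v) t).items = d.items ++ (p.1, v) :: t.filterMap (pvG ped) := by
      intro v
      rw [ih _ hnd' (hfresh' v), hins v]
      simp
    simp only [List.foldl_cons, List.filterMap_cons, pvG]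
    split_ifs with h1 h2 h3 h4 h5
    · exact step _
    · exact step _
    · exact step _
    · exact step _
    · exact step _
    · exact ih _ hnd' (fun q hq => hfresh q (by simp [hq]))

theorem pv_bucket (ped : PySem.Dict String String) (i : Int) (lab : String)
    (h1 : ∀ p : String × String, (∃ e, pvG ped p = some (p.1, (i, e))) ↔ p.2 = lab) :
    ∀ l : List (String × String),
      ((l.filterMap (pvG ped)).filter (fun q => q.2.1 == i)).map (fun q => q.2.2) =
        (l.filter (fun p => p.2 == lab)).map (fun p => ped.getD p.1 "") := by
  intro l
  induction l with
  | nil => simp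
  | cons p t ih =>
    simp only [List.filterMap_cons, List.filter_cons]
    by_cases hlab : p.2 = lab
    · obtain ⟨e, he⟩ := (h1 p).mpr hlab
      have he' : e = ped.getD p.1 "" := by
        simp only [pvG] at he
        split_ifs at he <;> simp_all
      rw [he]
      simp [hlab, ih, he']
    · have hni : ∀ n e, pvG ped p = some (p.1, (n, e)) → n ≠ i := by
        intro n e hG hn
        exact hlab ((h1 p).mp ⟨e, by rw [hG, hn]⟩)
      rcases hG : pvG ped p with _ | q
      · simp [hlab, ih]
      · have hshape : q.1 = p.1 := by
          simp only [pvG] at hG; split_ifs at hG <;> simp_all [Prod.ext_iff]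
        have hq : q.2.1 ≠ i := by
          refine hni q.2.1 q.2.2 ?_
          rw [hG, ← hshape]
        simp [hlab, hq, ih]


set_option maxHeartbeats 1000000 in
theorem map_priority_to_events_eq (priority_edges events : List (String × String)) :
    map_priority_to_events priority_edges events = map_priority_to_events_alt priority_edges events := by
  simp only [map_priority_to_events, map_priority_to_events_alt]
  set ped := PySem.Dict.ofList priority_edges with hped
  set evd := PySem.Dict.ofList events with hevd
  have hknd : evd.keys.Nodup := PySem.Dict.nodup_keys_ofList events
  have hitems : evd.items = evd.keys.map (fun k => (k, evd.getD k "")) :=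
    PySem.Dict.items_eq_map_keys evd hknd ""
  have hfstnd : (evd.items.map Prod.fst).Nodup := hknd
  -- A's first loop (over keys) is the same loop over items
  have hkeyfold : (evd.keys.foldl (fun (d : PySem.Dict String (Int × String)) key =>
      let v := evd.getD key ""
      if v == "fire" then d.insert key (1, ped.getD key "")
      else if v == "destroyed_buildings" then d.insert key (2, ped.getD key "")
      else if v == "human_aid_rehabilitation" then d.insert key (3, ped.getD key "")
      else if v == "military_vehicles" then d.insert key (4, ped.getD key "")
      else if v == "combat" then d.insert key (5, ped.getD key "")
      else d) PySem.Dict.empty) = (evd.items.foldl (fun (d : PySem.Dict String (Int × String)) p =>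
      if p.2 == "fire" then d.insert p.1 (1, ped.getD p.1 "")
      else if p.2 == "destroyed_buildings" then d.insert p.1 (2, ped.getD p.1 "")
      else if p.2 == "human_aid_rehabilitation" then d.insert p.1 (3, ped.getD p.1 "")
      else if p.2 == "military_vehicles" then d.insert p.1 (4, ped.getD p.1 "")
      else if p.2 == "combat" then d.insert p.1 (5, ped.getD p.1 "")
      else d) PySem.Dict.empty) := by
    rw [hitems, List.foldl_map]
  -- mapped_dict's items are the kept, priority-tagged event pairs
  have hm : (evd.keys.foldl (fun (d : PySem.Dict String (Int × String)) key =>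
      let v := evd.getD key ""
      if v == "fire" then d.insert key (1, ped.getD key "")
      else if v == "destroyed_buildings" then d.insert key (2, ped.getD key "")
      else if v == "human_aid_rehabilitation" then d.insert key (3, ped.getD key "")
      else if v == "military_vehicles" then d.insert key (4, ped.getD key "")
      else if v == "combat" then d.insert key (5, ped.getD key "")
      else d) PySem.Dict.empty).items = (evd.items.filterMap (pvG ped)) := by
    rw [hkeyfold]
    have := pv_mapped_items ped evd.items PySem.Dict.empty hfstnd
      (by intro p _; exact PySem.Dict.contains_empty p.1)
    have h0 : (PySem.Dict.empty : PySem.Dict String (Int × String)).items = [] := rfl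
    rw [h0, List.nil_append] at this
    exact this
  rw [hm]
  -- the stable sort is the five buckets in priority order
  have hsorted : PySem.List.sorted (evd.items.filterMap (pvG ped)) (fun item => item.2.1) =
      ((evd.items.filterMap (pvG ped)).filter (fun q => q.2.1 == 1)) ++ ((evd.items.filterMap (pvG ped)).filter (fun q => q.2.1 == 2)) ++
      ((evd.items.filterMap (pvG ped)).filter (fun q => q.2.1 == 3)) ++ ((evd.items.filterMap (pvG ped)).filter (fun q => q.2.1 == 4)) ++
      ((evd.items.filterMap (pvG ped)).filter (fun q => q.2.1 == 5)) :=
    pv_sorted_five _ (evd.items.filterMap (pvG ped)) (pv_bounds ped evd.items)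
  -- dict(sorted(...)) round-trips: its items are exactly the sorted list
  have hSnd : ((PySem.List.sorted (evd.items.filterMap (pvG ped)) (fun item => item.2.1)).map Prod.fst).Nodup := by
    have hperm : (PySem.List.sorted (evd.items.filterMap (pvG ped)) (fun item => item.2.1)).Perm (evd.items.filterMap (pvG ped)) := PySem.List.sorted_perm (evd.items.filterMap (pvG ped)) _ false
    have hMnd : ((evd.items.filterMap (pvG ped)).map Prod.fst).Nodup := by
      rw [pv_fst_filterMap]
      exact hfstnd.sublist (List.Sublist.map Prod.fst (List.filter_sublist))
    exact ((hperm.map Prod.fst).nodup_iff).mpr hMnd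
  have hsd : (PySem.Dict.ofList (PySem.List.sorted (evd.items.filterMap (pvG ped)) (fun item => item.2.1))).items = PySem.List.sorted (evd.items.filterMap (pvG ped)) (fun item => item.2.1) := by
    have := PySem.Dict.items_foldl_insert_fresh (PySem.List.sorted (evd.items.filterMap (pvG ped)) (fun item => item.2.1)) Prod.fst Prod.snd PySem.Dict.empty
      (by intro a _; exact PySem.Dict.contains_empty a.1) hSnd
    have h0 : (PySem.Dict.empty : PySem.Dict String (Int × String)).items = [] := rfl
    rw [h0, List.nil_append] at this
    simp only [Prod.mk.eta, List.map_id'] at this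
    have hof : PySem.Dict.ofList (PySem.List.sorted (evd.items.filterMap (pvG ped)) (fun item => item.2.1)) =
        List.foldl (fun (d : PySem.Dict String (Int × String)) a => d.insert a.1 a.2)
          PySem.Dict.empty (PySem.List.sorted (evd.items.filterMap (pvG ped)) (fun item => item.2.1)) := rfl
    rw [hof]
    exact this
  have hsdk : (PySem.Dict.ofList (PySem.List.sorted (evd.items.filterMap (pvG ped)) (fun item => item.2.1))).keys.Nodup := PySem.Dict.nodup_keys_ofList _
  -- A's extraction loop maps (·.2.2) over the sorted items
  have hext : (PySem.Dict.ofList (PySem.List.sorted (evd.items.filterMap (pvG ped)) (fun item => item.2.1))).keys.foldl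
      (fun acc key => acc ++ [((PySem.Dict.ofList (PySem.List.sorted (evd.items.filterMap (pvG ped)) (fun item => item.2.1))).getD key (0, "")).2]) [] =
      (PySem.List.sorted (evd.items.filterMap (pvG ped)) (fun item => item.2.1)).map (fun q => q.2.2) := by
    rw [pv_foldl_append_singleton (fun k => ((PySem.Dict.ofList (PySem.List.sorted (evd.items.filterMap (pvG ped)) (fun item => item.2.1))).getD k (0, "")).2)
      (PySem.Dict.ofList (PySem.List.sorted (evd.items.filterMap (pvG ped)) (fun item => item.2.1))).keys []]
    conv_rhs => rw [← hsd, PySem.Dict.items_eq_map_keys _ hsdk (0, ""), List.map_map]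
    simp
  rw [hext, hsorted]
  -- each bucket extracts the edges of the events carrying that label
  have hb1 := pv_bucket ped 1 "fire" (by
    intro p; constructor
    · rintro ⟨e, he⟩; simp only [pvG] at he; split_ifs at he <;> simp_all
    · intro h; exact ⟨ped.getD p.1 "", by simp [pvG, h]⟩) evd.items
  have hb2 := pv_bucket ped 2 "destroyed_buildings" (by
    intro p; constructor
    · rintro ⟨e, he⟩; simp only [pvG] at he; split_ifs at he <;> simp_all
    · intro h; exact ⟨ped.getD p.1 "", by simp [pvG, h]⟩) evd.items
  have hb3 := pv_bucket ped 3 "human_aid_rehabilitation" (by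
    intro p; constructor
    · rintro ⟨e, he⟩; simp only [pvG] at he; split_ifs at he <;> simp_all
    · intro h; exact ⟨ped.getD p.1 "", by simp [pvG, h]⟩) evd.items
  have hb4 := pv_bucket ped 4 "military_vehicles" (by
    intro p; constructor
    · rintro ⟨e, he⟩; simp only [pvG] at he; split_ifs at he <;> simp_all
    · intro h; exact ⟨ped.getD p.1 "", by simp [pvG, h]⟩) evd.items
  have hb5 := pv_bucket ped 5 "combat" (by
    intro p; constructor
    · rintro ⟨e, he⟩; simp only [pvG] at he; split_ifs at he <;> simp_all
    · intro h; exact ⟨ped.getD p.1 "", by simp [pvG, h]⟩) evd.items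
  simp only [List.foldl_cons, List.foldl_nil, List.map_append]
  rw [hb1, hb2, hb3, hb4, hb5]
  simp

-- ===== VERDICT (by name: the statement is the Claim_ definition above) =====
theorem map_priority_to_events_spec : Claim_equal_map_priority_to_events := by
  intro pe ev _ _
  unfold Spec_map_priority_to_events
  exact map_priority_to_events_eq pe ev
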